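-- pv_equiv track=rewrite | github.com/17jo/Human-vs-AI-Domineering-game | func.py | PomocnaCrtanja
-- ===== SOURCE A (Python) =====
-- def PomocnaCrtanja(n:int,SymOrNum:bool) -> str:
--     ln:str = ""
--     ln += "\n\t"
--     if SymOrNum:
--         ln += "--"
--         for i in range(0,n):
--             ln += "----"
--         ln += "-"
--     else:
--         ln += " "
--         for i in range(0,n):
--            ln += "  "+str(i)+" "
--         ln += ""
--
--     return ln
-- ===== SOURCE B (Python) =====
-- def PomocnaCrtanja(n: int, SymOrNum: bool) -> str:
--     if SymOrNum:
--         return "\n\t" + "-" * (4 * max(0, n) + 3)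
--     else:
--         return "\n\t " + "".join("  " + str(i) + " " for i in range(n))
-- ===== Notes on version B (the rewrite author's own statement) =====
-- stated objective: simpler
-- what changed: Replaces the character-accumulation loop with a closed-form dash count ('-' * (4*max(0,n)+3)) for the separator branch and a join over a generator for the number branch.
import Mathlib
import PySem

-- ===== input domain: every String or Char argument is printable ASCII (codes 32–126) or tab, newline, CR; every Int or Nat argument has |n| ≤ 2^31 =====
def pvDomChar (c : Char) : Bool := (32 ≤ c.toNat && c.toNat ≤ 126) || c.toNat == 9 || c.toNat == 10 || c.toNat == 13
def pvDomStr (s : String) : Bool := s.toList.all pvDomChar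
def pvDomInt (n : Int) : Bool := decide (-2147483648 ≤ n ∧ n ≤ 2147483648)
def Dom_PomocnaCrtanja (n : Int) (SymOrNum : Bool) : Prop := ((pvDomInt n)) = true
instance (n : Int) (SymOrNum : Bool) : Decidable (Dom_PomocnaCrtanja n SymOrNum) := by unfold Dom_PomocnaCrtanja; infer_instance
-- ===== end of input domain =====

set_option maxRecDepth 100000


-- B replaces A's character-accumulation loops by a closed-form dash count for the
-- separator branch and a join of mapped number cells for the number branch (simpler).

-- ===== PORT A =====
def PomocnaCrtanja (n : Int) (SymOrNum : Bool) : String :=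
  let ln : String := ""
  let ln := ln ++ "\n\t"
  if SymOrNum then
    let ln := ln ++ "--"
    let ln := (PySem.List.pyRange 0 n 1).foldl (fun ln _ => ln ++ "----") ln
    ln ++ "-"
  else
    let ln := ln ++ " "
    let ln := (PySem.List.pyRange 0 n 1).foldl
      (fun ln i => ln ++ ("  " ++ PySem.Int.toStr i ++ " ")) ln
    ln ++ ""

-- ===== PORT B =====
def PomocnaCrtanja_alt (n : Int) (SymOrNum : Bool) : String :=
  if SymOrNum then
    "\n\t" ++ String.ofList (List.replicate (4 * (max 0 n).toNat + 3) '-')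
  else
    "\n\t " ++ String.join ((PySem.List.pyRange 0 n 1).map (fun i => "  " ++ PySem.Int.toStr i ++ " "))

-- ===== PRECONDITION & SPEC =====
def Spec_PomocnaCrtanja (n : Int) (SymOrNum : Bool) (out : String) : Prop := out = PomocnaCrtanja_alt n SymOrNum
instance (n : Int) (SymOrNum : Bool) (out : String) : Decidable (Spec_PomocnaCrtanja n SymOrNum out) := by unfold Spec_PomocnaCrtanja; infer_instance

-- ===== CLAIM (what is proved, stated in full; the proofs are below) =====
def Claim_equal_PomocnaCrtanja : Prop := ∀ (n : Int) (SymOrNum : Bool), Dom_PomocnaCrtanja n SymOrNum → Spec_PomocnaCrtanja n SymOrNum (PomocnaCrtanja n SymOrNum)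

-- ===== LEMMAS AND PROOFS =====

theorem pv_foldl_append (l : List String) (s : String) :
    l.foldl (· ++ ·) s = s ++ l.foldl (· ++ ·) "" := by
  induction l generalizing s with
  | nil => simp
  | cons a t ih =>
      simp only [List.foldl_cons]
      rw [ih, ih ("" ++ a)]
      simp [String.append_assoc]

theorem pv_join_cons (a : String) (t : List String) :
    String.join (a :: t) = a ++ String.join t := by
  show (a :: t).foldl (· ++ ·) "" = _
  rw [List.foldl_cons, pv_foldl_append]
  simp [String.join]

-- a left fold appending f x for each x equals init ++ join of the mapped pieces
theorem foldl_append_join {α : Type} (l : List α) (f : α → String) (init : String) :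
    l.foldl (fun s x => s ++ f x) init = init ++ String.join (l.map f) := by
  induction l generalizing init with
  | nil => simp [String.join]
  | cons a t ih =>
      rw [List.map_cons, pv_join_cons, List.foldl_cons, ih, String.append_assoc]

theorem join_replicate_dashes (k : Nat) :
    String.join (List.replicate k "----") = String.ofList (List.replicate (4 * k) '-') := by
  induction k with
  | zero => rfl
  | succ m ih =>
      rw [List.replicate_succ, pv_join_cons, ih]
      apply String.toList_inj.mp
      simp only [String.toList_append, String.toList_ofList]
      rw [show ("----" : String).toList = List.replicate 4 '-' from rfl,
          show 4 * (m + 1) = 4 + 4 * m by omega, List.replicate_add]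

theorem toNat_max_zero (n : Int) : (max 0 n).toNat = n.toNat := by omega

theorem PomocnaCrtanja_spec : Claim_equal_PomocnaCrtanja := by
  intro n SymOrNum _
  unfold Spec_PomocnaCrtanja PomocnaCrtanja PomocnaCrtanja_alt
  cases SymOrNum with
  | true =>
      simp only [if_true]
      have hlen : (PySem.List.pyRange 0 n 1).length = n.toNat := by
        rw [PySem.List.length_pyRange_one]; omega
      rw [foldl_append_join, List.map_const', hlen, join_replicate_dashes, toNat_max_zero]
      apply String.toList_inj.mp
      simp only [String.toList_append, String.toList_ofList]
      rw [show ("" : String).toList = [] from rfl,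
          show ("\n\t" : String).toList = ['\n', '\t'] from rfl,
          show ("--" : String).toList = List.replicate 2 '-' from rfl,
          show ("-" : String).toList = List.replicate 1 '-' from rfl,
          show 4 * n.toNat + 3 = 2 + (4 * n.toNat + 1) by omega,
          List.replicate_add, List.replicate_add]
      simp
  | false =>
      simp only [if_false, Bool.false_eq_true, String.append_empty]
      rw [foldl_append_join]
      apply String.toList_inj.mp
      simp [String.toList_append]
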